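-- pv_equiv track=rewrite | github.com/MediaMonitoringAndAnalysis/EntryExtraction | entry_extraction/semantic_extraction.py | _transform_sublists
-- ===== SOURCE A (Python) =====
-- from typing import List, Tuple, Union, Dict
--
-- def _transform_sublists(input_sublists: List[List[int]]) -> List[List[int]]:
--     flattened_list = [item for sublist in input_sublists for item in sublist]
--     result = []
--     current_group = []
--
--     for index, value in enumerate(flattened_list):
--         if value == 1:  # Start a new group if we encounter a 1
--             if (
--                 current_group
--             ):  # Add the previous group to the result if it's not empty
--                 result.append(current_group)
--             current_group = [index]
--         else:
--             current_group.append(index)  # Add the index to the current group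
--
--     if current_group:  # Add the last group if it exists
--         result.append(current_group)
--
--     return result
-- ===== SOURCE B (Python) =====
-- from typing import List
--
-- def _transform_sublists(input_sublists: List[List[int]]) -> List[List[int]]:
--     flattened = [item for sublist in input_sublists for item in sublist]
--     n = len(flattened)
--     boundaries = [i for i, v in enumerate(flattened) if v == 1]
--     if n and (not boundaries or boundaries[0] != 0):
--         boundaries = [0] + boundaries
--     ends = boundaries[1:] + [n]
--     return [list(range(s, e)) for s, e in zip(boundaries, ends)]
-- ===== Notes on version B (the rewrite author's own statement) =====
-- stated objective: simpler
-- what changed: Instead of growing one group element-by-element in a stateful loop with a pending-group accumulator and a final flush, B first collects the list of boundary indices (positions of 1s, with 0 prepended when the list is non-empty and does not start with 1) and then emits each group directly as the range from one boundary to the next (or to the end).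
import Mathlib
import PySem

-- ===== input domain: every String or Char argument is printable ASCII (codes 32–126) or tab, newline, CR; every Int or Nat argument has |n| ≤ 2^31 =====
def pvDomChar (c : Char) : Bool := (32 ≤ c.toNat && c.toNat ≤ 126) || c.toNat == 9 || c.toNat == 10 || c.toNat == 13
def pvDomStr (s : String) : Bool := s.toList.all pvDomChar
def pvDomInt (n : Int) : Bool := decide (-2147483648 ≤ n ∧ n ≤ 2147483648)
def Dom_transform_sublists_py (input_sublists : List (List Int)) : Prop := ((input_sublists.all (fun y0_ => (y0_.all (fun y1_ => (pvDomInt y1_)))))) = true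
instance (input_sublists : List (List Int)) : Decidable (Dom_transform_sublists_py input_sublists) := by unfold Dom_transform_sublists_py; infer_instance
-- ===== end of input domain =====

-- B: instead of growing one group per element, collect the 1-boundaries first and emit
-- each group as a consecutive index range (objective: simpler decomposition, same cost).

-- ===== PORT A =====
def transform_sublists_py (input_sublists : List (List Int)) : List (List Int) :=
  let flattened_list := input_sublists.flatMap (fun sublist => sublist)
  let st := (PySem.List.enumerate flattened_list 0).foldl
    (fun (st : List (List Int) × List Int) iv =>
      if iv.2 = 1 then
        ((if st.2 ≠ [] then st.1 ++ [st.2] else st.1), [iv.1])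
      else
        (st.1, st.2 ++ [iv.1]))
    ([], [])
  if st.2 ≠ [] then st.1 ++ [st.2] else st.1

-- ===== PORT B =====
def transform_sublists_py_alt (input_sublists : List (List Int)) : List (List Int) :=
  let flattened := input_sublists.flatMap (fun sublist => sublist)
  let n : Int := flattened.length
  let bs := ((PySem.List.enumerate flattened 0).filter (fun iv => iv.2 = 1)).map (fun iv => iv.1)
  let boundaries := if flattened.length ≠ 0 ∧ (bs = [] ∨ bs.head? ≠ some 0) then (0 : Int) :: bs else bs
  let ends := boundaries.tail ++ [n]
  (boundaries.zip ends).map (fun se => PySem.List.pyRange se.1 se.2 1)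

-- ===== PRECONDITION & SPEC =====
def Spec_transform_sublists_py (input_sublists : List (List Int)) (out : List (List Int)) : Prop := out = transform_sublists_py_alt input_sublists
instance (input_sublists : List (List Int)) (out : List (List Int)) : Decidable (Spec_transform_sublists_py input_sublists out) := by unfold Spec_transform_sublists_py; infer_instance

-- ===== CLAIM (what is proved, stated in full; the proofs are below) =====
def Claim_equal_transform_sublists_py : Prop := ∀ (input_sublists : List (List Int)), Dom_transform_sublists_py input_sublists → Spec_transform_sublists_py input_sublists (transform_sublists_py input_sublists)

-- ===== LEMMAS AND PROOFS =====

-- Reference grouping: process the flattened list with pending group `cur`, next index `k`.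
def pvGrp (cur : List Int) (k : Int) : List Int → List (List Int)
  | [] => if cur = [] then [] else [cur]
  | v :: t =>
      if v = 1 then (if cur = [] then [] else [cur]) ++ pvGrp [k] (k + 1) t
      else pvGrp (cur ++ [k]) (k + 1) t

-- Indices (from k) of the 1s in the list.
def pvBs (k : Int) : List Int → List Int
  | [] => []
  | v :: t => if v = 1 then k :: pvBs (k + 1) t else pvBs (k + 1) t

-- Ranges from each boundary to the next (or to n).
def pvRanges (n : Int) : List Int → List (List Int)
  | [] => []
  | b :: bs => PySem.List.pyRange b (bs.headD n) 1 :: pvRanges n bs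

def pvStep : (List (List Int) × List Int) → (Int × Int) → (List (List Int) × List Int) :=
  fun st iv =>
    if iv.2 = 1 then ((if st.2 ≠ [] then st.1 ++ [st.2] else st.1), [iv.1])
    else (st.1, st.2 ++ [iv.1])

def pvFlush : (List (List Int) × List Int) → List (List Int) :=
  fun st => if st.2 ≠ [] then st.1 ++ [st.2] else st.1

-- A's loop equals the reference grouping.
theorem pvA_loop (l : List Int) : ∀ (res : List (List Int)) (cur : List Int) (k : Int),
    pvFlush ((PySem.List.enumerate l k).foldl pvStep (res, cur)) = res ++ pvGrp cur k l := by
  induction l with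
  | nil =>
      intro res cur k
      by_cases h : cur = [] <;>
        simp [PySem.List.enumerate_nil, pvFlush, pvGrp, h]
  | cons v t ih =>
      intro res cur k
      rw [PySem.List.enumerate_cons]
      by_cases hv : v = 1
      · by_cases h : cur = [] <;>
          simp [List.foldl_cons, pvStep, pvGrp, hv, h, ih, List.append_assoc]
      · simp [List.foldl_cons, pvStep, pvGrp, hv, ih]

-- B's boundary list equals pvBs.
theorem pvB_bs (l : List Int) : ∀ (k : Int),
    ((PySem.List.enumerate l k).filter (fun iv => iv.2 = 1)).map (fun iv => iv.1) = pvBs k l := by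
  induction l with
  | nil => intro k; simp [PySem.List.enumerate_nil, pvBs]
  | cons v t ih =>
      intro k
      rw [PySem.List.enumerate_cons]
      by_cases hv : v = 1 <;> simp [hv, pvBs, ih]

-- B's zip-with-ends construction equals pvRanges.
theorem pvB_zip (bs : List Int) : ∀ (n : Int),
    ((bs.zip (bs.tail ++ [n])).map (fun se => PySem.List.pyRange se.1 se.2 1)) = pvRanges n bs := by
  induction bs with
  | nil => intro n; simp [pvRanges]
  | cons b bs ih =>
      intro n
      cases bs with
      | nil => simp [pvRanges]
      | cons b' bs' =>
          have := ih n
          simp only [List.tail_cons] at this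
          simp [pvRanges, this]

theorem pvRange_ne_nil {c k : Int} (h : c < k) : PySem.List.pyRange c k 1 ≠ [] := by
  intro hnil
  have := congrArg List.length hnil
  rw [PySem.List.length_pyRange_one] at this
  simp at this
  omega

theorem pvRange01 : PySem.List.pyRange 0 1 1 = [(0 : Int)] := by decide

-- Core: grouping with a pending contiguous range [c, k) equals ranges over c :: boundaries.
theorem pvGrp_ranges (l : List Int) : ∀ (c k : Int), c < k →
    pvGrp (PySem.List.pyRange c k 1) k l = pvRanges (k + l.length) (c :: pvBs k l) := by
  induction l with
  | nil =>
      intro c k hck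
      simp [pvGrp, pvRange_ne_nil hck, pvBs, pvRanges]
  | cons v t ih =>
      intro c k hck
      by_cases hv : v = 1
      · have h1 : pvGrp ([(k : Int)]) (k + 1) t = pvRanges (k + 1 + t.length) ((k : Int) :: pvBs (k + 1) t) := by
          have := ih k (k + 1) (by omega)
          rwa [PySem.List.pyRange_one_singleton] at this
        have hn : (k : Int) + ((t.length + 1 : Nat) : Int) = k + 1 + t.length := by push_cast; ring
        simp only [pvGrp, pvBs, hv, List.length_cons, hn]
        rw [if_neg (pvRange_ne_nil hck), h1]
        simp [pvRanges]
      · have h2 : PySem.List.pyRange c k 1 ++ [(k : Int)] = PySem.List.pyRange c (k + 1) 1 := by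
          rw [PySem.List.pyRange_one_succ_right (by omega : c ≤ k)]
        have hn : (k : Int) + ((t.length + 1 : Nat) : Int) = k + 1 + t.length := by push_cast; ring
        simp only [pvGrp, pvBs, hv, List.length_cons, hn, h2]
        exact ih c (k + 1) (by omega)

-- every boundary index in pvBs k t is ≥ k
theorem pvBs_ge (t : List Int) : ∀ (k b : Int), b ∈ pvBs k t → k ≤ b := by
  induction t with
  | nil => intro k b hb; simp [pvBs] at hb
  | cons x xs ih =>
      intro k b hb
      by_cases hx : x = 1
      · simp [pvBs, hx] at hb
        rcases hb with h | h
        · omega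
        · have := ih (k + 1) b h; omega
      · simp [pvBs, hx] at hb
        have := ih (k + 1) b hb; omega

-- Top-level: grouping from scratch equals B's boundary construction.
theorem pvGrp_top (l : List Int) :
    pvGrp [] 0 l = pvRanges l.length
      (if l.length ≠ 0 ∧ (pvBs 0 l = [] ∨ (pvBs 0 l).head? ≠ some 0) then (0 : Int) :: pvBs 0 l else pvBs 0 l) := by
  cases l with
  | nil => simp [pvGrp, pvBs, pvRanges]
  | cons v t =>
      have h1 : pvGrp ([(0 : Int)]) 1 t = pvRanges (1 + t.length) ((0 : Int) :: pvBs 1 t) := by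
        have := pvGrp_ranges t 0 1 (by omega)
        rwa [pvRange01] at this
      have hn : ((t.length + 1 : Nat) : Int) = 1 + t.length := by push_cast; ring
      by_cases hv : v = 1
      · have hbs : pvBs 0 (v :: t) = (0 : Int) :: pvBs 1 t := by
          simp [pvBs, hv]
        have hcond : ¬(((v :: t).length ≠ 0) ∧ (pvBs 0 (v :: t) = [] ∨ (pvBs 0 (v :: t)).head? ≠ some 0)) := by
          simp [hbs]
        rw [if_neg hcond, hbs]
        simp only [List.length_cons, hn]
        simp only [pvGrp, hv]
        simp [h1]
      · have hbs : pvBs 0 (v :: t) = pvBs 1 t := by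
          simp [pvBs, hv]
        have hhead : (pvBs 1 t).head? ≠ some 0 := by
          intro h
          have hmem : (0 : Int) ∈ pvBs 1 t := by
            cases hb : pvBs 1 t with
            | nil => rw [hb] at h; simp at h
            | cons a as =>
                rw [hb] at h; simp at h; simp [h]
          have := pvBs_ge t 1 0 hmem
          omega
        have hcond : (((v :: t).length ≠ 0) ∧ (pvBs 0 (v :: t) = [] ∨ (pvBs 0 (v :: t)).head? ≠ some 0)) := by
          exact ⟨by simp, Or.inr (by rw [hbs]; exact hhead)⟩
        rw [if_pos hcond, hbs]
        simp only [List.length_cons, hn]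
        simp only [pvGrp, hv]
        simpa using h1

-- ===== VERDICT (by name: the statement is the Claim_ definition above) =====
theorem transform_sublists_py_spec : Claim_equal_transform_sublists_py := by
  intro xs _
  unfold Spec_transform_sublists_py
  change pvFlush ((PySem.List.enumerate (xs.flatMap (fun sublist => sublist)) 0).foldl pvStep ([], [])) = _
  rw [pvA_loop, List.nil_append, pvGrp_top]
  unfold transform_sublists_py_alt
  simp only [pvB_bs, pvB_zip]
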